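-- pv_equiv track=rewrite | github.com/PabloPAF/paintBinary | utils.py | group_bits_by_lines
-- ===== SOURCE A (Python) =====
-- def group_bits_by_lines(bits, band_height=20):
--     if not bits:
--         return []
--     bands = {}
--     for bit in bits:
--         band_key = (bit['y'] // band_height) * band_height
--         bands.setdefault(band_key, []).append(bit)
--     sorted_band_keys = sorted(bands.keys())
--     lines = []
--     for key in sorted_band_keys:
--         line = sorted(bands[key], key=lambda b: b['x'])
--         lines.append(line)
--     return lines
-- ===== SOURCE B (Python) =====
-- def group_bits_by_lines(bits, band_height=20):
--     def band(b):
--         return (b['y'] // band_height) * band_height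
--
--     ordered = sorted(bits, key=lambda b: (band(b), b['x']))
--     lines = []
--     cur = []
--     for bit in ordered:
--         if cur and band(cur[-1]) != band(bit):
--             lines.append(cur)
--             cur = []
--         cur.append(bit)
--     if cur:
--         lines.append(cur)
--     return lines
-- ===== Notes on version B (the rewrite author's own statement) =====
-- stated objective: alternative
-- what changed: Replaces the band-keyed dict (setdefault/append) plus a sort of the keys and a per-band sort with one global stable sort on the composite key (band, x) followed by a single linear adjacent-grouping pass.
import Mathlib
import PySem

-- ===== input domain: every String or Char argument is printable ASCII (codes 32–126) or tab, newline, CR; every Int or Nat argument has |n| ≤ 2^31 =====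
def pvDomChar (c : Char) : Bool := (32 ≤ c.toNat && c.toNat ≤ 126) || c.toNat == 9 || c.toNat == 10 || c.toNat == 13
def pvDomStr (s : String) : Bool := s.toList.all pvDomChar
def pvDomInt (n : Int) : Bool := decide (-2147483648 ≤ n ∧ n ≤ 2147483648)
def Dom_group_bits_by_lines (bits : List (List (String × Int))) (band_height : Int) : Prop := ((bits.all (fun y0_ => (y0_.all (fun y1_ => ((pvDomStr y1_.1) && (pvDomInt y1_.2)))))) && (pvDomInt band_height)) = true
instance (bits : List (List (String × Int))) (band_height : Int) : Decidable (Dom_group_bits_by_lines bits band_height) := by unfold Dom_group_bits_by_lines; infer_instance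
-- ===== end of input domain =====

-- B replaces A's band-keyed dict + key sort + per-band x-sort with ONE global stable sort on the
-- composite key (band, x) followed by a single linear adjacent-grouping pass (alternative decomposition,
-- same asymptotic cost). Return value only; neither version mutates its argument.

-- bit[k]: first-match lookup; Pre_ guarantees the key is present, so the 0 default is never used on admitted inputs
def pvLookup (bit : List (String × Int)) (k : String) : Int :=
  ((PySem.Dict.mk bit).get? k).getD 0

-- (bit['y'] // band_height) * band_height
def pvBand (band_height : Int) (bit : List (String × Int)) : Int :=
  PySem.Int.floordiv (pvLookup bit "y") band_height * band_height

-- ===== PORT A =====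
-- bands.setdefault(band_key, []).append(bit) ≡ bands[band_key] = bands.get(band_key, []) + [bit], i.e. Dict.modify;
-- bands[key] is ported as (get? key).getD [] — key is always a member of bands.keys, so the [] default is never used.
def group_bits_by_lines (bits : List (List (String × Int))) (band_height : Int) : List (List (List (String × Int))) :=
  if bits = [] then []
  else
    let bands := bits.foldl
      (fun d bit => d.modify (pvBand band_height bit) [] (fun cur => cur ++ [bit]))
      PySem.Dict.empty
    let sorted_band_keys := PySem.List.sorted bands.keys (fun k => k) false
    sorted_band_keys.foldl
      (fun lines key =>
        lines ++ [PySem.List.sorted ((bands.get? key).getD []) (fun b => pvLookup b "x") false])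
      []

-- ===== PORT B =====
def group_bits_by_lines_alt (bits : List (List (String × Int))) (band_height : Int) : List (List (List (String × Int))) :=
  let ordered := PySem.List.sorted2 bits (fun b => pvBand band_height b) (fun b => pvLookup b "x") false
  let st := ordered.foldl
    (fun (st : List (List (List (String × Int))) × List (List (String × Int))) bit =>
      match st.2.getLast? with        -- 'cur and band(cur[-1]) != band(bit)'
      | some last =>
        if pvBand band_height last ≠ pvBand band_height bit
        then (st.1 ++ [st.2], [bit])  -- lines.append(cur); cur = []; cur.append(bit)
        else (st.1, st.2 ++ [bit])    -- cur.append(bit)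
      | none => (st.1, st.2 ++ [bit]))
    ([], [])
  if st.2 = [] then st.1 else st.1 ++ [st.2]

-- ===== PRECONDITION & SPEC =====
-- A raises KeyError when some bit lacks key 'y' or 'x', and ZeroDivisionError when band_height = 0
-- with bits nonempty; Pre_ excludes exactly those (raising) inputs.
def Pre_group_bits_by_lines (bits : List (List (String × Int))) (band_height : Int) : Prop :=
  bits = [] ∨ (band_height ≠ 0 ∧ ∀ bit ∈ bits,
    (PySem.Dict.mk bit).contains "y" = true ∧ (PySem.Dict.mk bit).contains "x" = true)
instance (bits : List (List (String × Int))) (band_height : Int) : Decidable (Pre_group_bits_by_lines bits band_height) := by unfold Pre_group_bits_by_lines; infer_instance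

def pvWitness_group_bits_by_lines : (List (List (String × Int))) × Int :=
  ([[("y", 5), ("x", 1)], [("y", 25), ("x", 0)], [("y", 7), ("x", -3)]], 20)

def Spec_group_bits_by_lines (bits : List (List (String × Int))) (band_height : Int) (out : List (List (List (String × Int)))) : Prop := out = group_bits_by_lines_alt bits band_height
instance (bits : List (List (String × Int))) (band_height : Int) (out : List (List (List (String × Int)))) : Decidable (Spec_group_bits_by_lines bits band_height out) := by unfold Spec_group_bits_by_lines; infer_instance

-- ===== CLAIM (what is proved, stated in full; the proofs are below) =====
def Claim_equal_group_bits_by_lines : Prop := ∀ (bits : List (List (String × Int))) (band_height : Int), Dom_group_bits_by_lines bits band_height → Pre_group_bits_by_lines bits band_height → Spec_group_bits_by_lines bits band_height (group_bits_by_lines bits band_height)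

-- ===== LEMMAS AND PROOFS =====

-- the strict lexicographic comparison sorted2 uses, specialised to two Int keys
def plt2 {α : Type} (u v : α → Int) (a b : α) : Bool :=
  decide (u a < u b) || (!decide (u b < u a) && decide (v a < v b))

theorem plt2_asymm {α : Type} (u v : α → Int) (a b : α)
    (h : plt2 u v a b = true) : plt2 u v b a = false := by
  cases hb : plt2 u v b a with
  | false => rfl
  | true =>
    simp only [plt2, Bool.or_eq_true, Bool.and_eq_true, Bool.not_eq_true', decide_eq_true_eq,
      decide_eq_false_iff_not] at h hb
    omega

theorem plt2_trans {α : Type} (u v : α → Int) (a b c : α)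
    (h1 : plt2 u v a b = true) (h2 : plt2 u v b c = true) : plt2 u v a c = true := by
  simp only [plt2, Bool.or_eq_true, Bool.and_eq_true, Bool.not_eq_true', decide_eq_true_eq,
    decide_eq_false_iff_not] at *
  omega

theorem plt2_eq_true_iff {α : Type} (u v : α → Int) (a b : α) :
    plt2 u v a b = true ↔ (u a < u b ∨ (¬ u b < u a ∧ v a < v b)) := by
  simp [plt2]

theorem plt2_eq_false_iff {α : Type} (u v : α → Int) (a b : α) :
    plt2 u v a b = false ↔ (¬ u a < u b ∧ (u b < u a ∨ ¬ v a < v b)) := by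
  rw [← Bool.not_eq_true, plt2_eq_true_iff]
  constructor <;> intro h <;> omega

theorem sorted2_eq_foldl {α : Type} (xs : List α) (u v : α → Int) :
    PySem.List.sorted2 xs u v false =
      xs.foldl (fun acc x => PySem.List.insertBy (plt2 u v) x acc) [] := rfl

theorem pairwise_insertBy {α : Type} (u v : α → Int) (x : α) (l : List α)
    (h : l.Pairwise (fun a b => plt2 u v b a = false)) :
    (PySem.List.insertBy (plt2 u v) x l).Pairwise (fun a b => plt2 u v b a = false) := by
  induction l with
  | nil => simp [PySem.List.insertBy]
  | cons y ys ih =>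
    rcases List.pairwise_cons.mp h with ⟨hy, hys⟩
    by_cases hxy : plt2 u v x y = true
    · simp only [PySem.List.insertBy, hxy, if_true]
      refine List.pairwise_cons.mpr ⟨?_, h⟩
      intro z hz
      rcases List.mem_cons.mp hz with rfl | hz
      · exact plt2_asymm u v x z hxy
      · by_contra hzx
        have hzx' : plt2 u v z x = true := by
          cases hzx2 : plt2 u v z x with
          | false => exact absurd hzx2 hzx
          | true => rfl
        have := plt2_trans u v z x y hzx' hxy
        have := hy z hz
        simp_all
    · have hxy' : plt2 u v x y = false := by
        cases hh : plt2 u v x y with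
        | false => rfl
        | true => exact absurd hh hxy
      have hrw : PySem.List.insertBy (plt2 u v) x (y :: ys) =
          y :: PySem.List.insertBy (plt2 u v) x ys := by
        simp [PySem.List.insertBy, hxy']
      rw [hrw]
      refine List.pairwise_cons.mpr ⟨?_, ih hys⟩
      intro z hz
      rcases (PySem.List.mem_insertBy _ x z ys).mp hz with rfl | hz
      · exact hxy'
      · exact hy z hz

theorem sorted2_pairwise' {α : Type} (u v : α → Int) (xs : List α) :
    (PySem.List.sorted2 xs u v false).Pairwise (fun a b => plt2 u v b a = false) := by
  rw [sorted2_eq_foldl]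
  induction xs using List.reverseRecOn with
  | nil => simp
  | append_singleton m x ih =>
    rw [List.foldl_append, List.foldl_cons, List.foldl_nil]
    exact pairwise_insertBy u v x _ ih

-- filtering on the primary key commutes with a single lexicographic insertion into a sorted list
theorem insert_filter_commute {α : Type} (u v : α → Int) (k : Int) (x : α) (acc : List α)
    (h : acc.Pairwise (fun a b => plt2 u v b a = false)) :
    (PySem.List.insertBy (plt2 u v) x acc).filter (fun b => u b == k) =
      if u x == k
      then PySem.List.insertBy (fun a b => decide (v a < v b)) x (acc.filter (fun b => u b == k))
      else acc.filter (fun b => u b == k) := by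
  induction acc with
  | nil =>
    by_cases hx : (u x == k) = true
    · simp [PySem.List.insertBy, hx]
    · simp only [Bool.not_eq_true] at hx
      simp [PySem.List.insertBy, hx]
  | cons y ys ih =>
    rcases List.pairwise_cons.mp h with ⟨hy, hys⟩
    by_cases hxy : plt2 u v x y = true
    · have hins : PySem.List.insertBy (plt2 u v) x (y :: ys) = x :: y :: ys := by
        simp [PySem.List.insertBy, hxy]
      rw [hins]
      by_cases hx : (u x == k) = true
      · have hxk : u x = k := by simpa using hx
        rw [List.filter_cons, if_pos hx, if_pos hx]
        cases hfs : (y :: ys).filter (fun b => u b == k) with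
        | nil => simp [PySem.List.insertBy]
        | cons z t =>
          have hz : z ∈ (y :: ys).filter (fun b => u b == k) := by
            rw [hfs]; exact List.mem_cons_self
          rw [List.mem_filter] at hz
          have hzk : u z = k := by simpa using hz.2
          have hvxz : decide (v x < v z) = true := by
            rcases List.mem_cons.mp hz.1 with rfl | hzys
            · -- z = y
              rw [plt2_eq_true_iff] at hxy
              simp only [decide_eq_true_eq]
              omega
            · have hzy := hy z hzys
              rw [plt2_eq_true_iff] at hxy
              rw [plt2_eq_false_iff] at hzy
              simp only [decide_eq_true_eq]
              omega
          simp [PySem.List.insertBy, hvxz]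
      · simp only [Bool.not_eq_true] at hx
        rw [List.filter_cons, if_neg (by simp [hx]), if_neg (by simp [hx])]
    · have hxy' : plt2 u v x y = false := by
        cases hh : plt2 u v x y with
        | false => rfl
        | true => exact absurd hh hxy
      have hins : PySem.List.insertBy (plt2 u v) x (y :: ys) =
          y :: PySem.List.insertBy (plt2 u v) x ys := by
        simp [PySem.List.insertBy, hxy']
      rw [hins]
      by_cases hpy : (u y == k) = true
      · have hyk : u y = k := by simpa using hpy
        rw [List.filter_cons, List.filter_cons, if_pos hpy, if_pos hpy, ih hys]
        by_cases hx : (u x == k) = true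
        · have hxk : u x = k := by simpa using hx
          rw [if_pos hx, if_pos hx]
          have hvxy : decide (v x < v y) = false := by
            rw [plt2_eq_false_iff] at hxy'
            simp only [decide_eq_false_iff_not]
            omega
          simp [PySem.List.insertBy, hvxy]
        · rw [if_neg hx, if_neg hx]
      · simp only [Bool.not_eq_true] at hpy
        rw [List.filter_cons, List.filter_cons, ih hys]
        simp [hpy]

theorem filter_sorted2 {α : Type} [DecidableEq α] (u v : α → Int) (k : Int) (bits : List α) :
    (PySem.List.sorted2 bits u v false).filter (fun b => u b == k) =
      PySem.List.sorted (bits.filter (fun b => u b == k)) v false := by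
  rw [sorted2_eq_foldl, PySem.List.sorted_eq_foldl_insertBy]
  induction bits using List.reverseRecOn with
  | nil => simp
  | append_singleton m x ih =>
    rw [List.foldl_append, List.foldl_cons, List.foldl_nil,
        List.filter_append, List.foldl_append]
    have hpw := sorted2_pairwise' u v m
    rw [sorted2_eq_foldl] at hpw
    rw [insert_filter_commute u v k x _ hpw, ih]
    by_cases hx : (u x == k) = true
    · simp [hx]
    · simp only [Bool.not_eq_true] at hx
      simp [hx]

-- A's grouping dict: lookup is the in-order filter of bits by band
theorem bands_getD (bits : List (List (String × Int))) (bh k : Int) :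
    ((bits.foldl (fun d bit => d.modify (pvBand bh bit) [] (fun cur => cur ++ [bit]))
        PySem.Dict.empty).get? k).getD [] =
      bits.filter (fun b => pvBand bh b == k) := by
  have hmap : bits.foldl (fun d bit => d.modify (pvBand bh bit) [] (fun cur => cur ++ [bit]))
        (PySem.Dict.empty : PySem.Dict Int (List (List (String × Int)))) =
      (bits.map (fun b => (pvBand bh b, b))).foldl
        (fun d p => d.modify p.1 [] (fun cur => cur ++ [p.2])) PySem.Dict.empty := by
    rw [List.foldl_map]
  rw [hmap, ← PySem.Dict.getD_eq_get?_getD, PySem.Dict.getD_foldl_modify_append]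
  simp [List.filter_map, Function.comp_def]

theorem bands_keys (bits : List (List (String × Int))) (bh : Int) :
    (bits.foldl (fun d bit => d.modify (pvBand bh bit) [] (fun cur => cur ++ [bit]))
        (PySem.Dict.empty : PySem.Dict Int (List (List (String × Int))))).keys =
      PySem.Set.ofList (bits.map (pvBand bh)) := by
  rw [PySem.Dict.keys_foldl_modify_key bits (pvBand bh) ([]) (fun _ bit => (fun cur => cur ++ [bit]))]
  simp [PySem.Set.update_eq_append_filter, PySem.Set.contains, PySem.Dict.keys_empty]

theorem foldl_append_map {α β : Type} (f : α → β) (ks : List α) (acc : List β) :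
    ks.foldl (fun lines k => lines ++ [f k]) acc = acc ++ ks.map f := by
  induction ks generalizing acc with
  | nil => simp
  | cons k ks ih => simp [ih, List.append_assoc]

-- A computes: for each distinct band key in increasing order, the x-sorted in-order filter of bits
theorem A_char (bits : List (List (String × Int))) (bh : Int) :
    group_bits_by_lines bits bh =
      (PySem.List.sorted (PySem.Set.ofList (bits.map (pvBand bh))) (fun k => k) false).map
        (fun k => PySem.List.sorted (bits.filter (fun b => pvBand bh b == k))
          (fun b => pvLookup b "x") false) := by
  by_cases hb : bits = []
  · subst hb; simp [group_bits_by_lines, PySem.Set.ofList, PySem.Set.empty]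
  · unfold group_bits_by_lines
    rw [if_neg hb]
    rw [foldl_append_map, bands_keys]
    simp only [List.nil_append]
    congr 1
    funext k
    rw [bands_getD]

-- B's grouping loop, characterised on any band-monotone list
def gstep {α : Type} (u : α → Int) (st : List (List α) × List α) (bit : α) :
    List (List α) × List α :=
  match st.2.getLast? with
  | some last => if u last ≠ u bit then (st.1 ++ [st.2], [bit]) else (st.1, st.2 ++ [bit])
  | none => (st.1, st.2 ++ [bit])

theorem ofList_append_singleton {α : Type} [BEq α] (l : List α) (x : α) :
    PySem.Set.ofList (l ++ [x]) = PySem.Set.add (PySem.Set.ofList l) x := by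
  simp [PySem.Set.ofList, List.foldl_append]

theorem gfold_char {α : Type} (u : α → Int) (l : List α)
    (hpw : l.Pairwise (fun a b => u a ≤ u b)) (hne : l ≠ []) :
    ∃ ks e, l.getLast? = some e ∧
      PySem.Set.ofList (l.map u) = ks ++ [u e] ∧ u e ∉ ks ∧
      l.foldl (gstep u) ([], []) =
        (ks.map (fun k => l.filter (fun b => u b == k)), l.filter (fun b => u b == u e)) := by
  induction l using List.reverseRecOn with
  | nil => exact absurd rfl hne
  | append_singleton m x ih =>
    by_cases hm : m = []
    · subst hm
      refine ⟨[], x, by simp, ?_, by simp, ?_⟩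
      · simp [PySem.Set.ofList, PySem.Set.add, PySem.Set.empty, PySem.Set.contains]
      · simp [gstep]
    · obtain ⟨ks, e, hlast, hF, hnot, hst⟩ :=
        ih (hpw.sublist (List.sublist_append_left m [x])) hm
      obtain ⟨m', rfl⟩ := List.getLast?_eq_some_iff.mp hlast
      have hpwm : (m' ++ [e]).Pairwise (fun a b => u a ≤ u b) :=
        hpw.sublist (List.sublist_append_left _ [x])
      have hble : ∀ b ∈ m' ++ [e], u b ≤ u e := by
        intro b hb
        rcases List.mem_append.mp hb with hb | hb
        · exact (List.pairwise_append.mp hpwm).2.2 b hb e (List.mem_singleton_self e)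
        · rw [List.mem_singleton] at hb; subst hb; exact le_refl _
      have hbx : ∀ b ∈ m' ++ [e], u b ≤ u x := by
        intro b hb
        exact (List.pairwise_append.mp hpw).2.2 b hb x (List.mem_singleton_self x)
      -- the running group ends with e
      have hcur : (m' ++ [e]).filter (fun b => u b == u e) =
          m'.filter (fun b => u b == u e) ++ [e] := by
        rw [List.filter_append]
        simp
      have hfold : (m' ++ [e] ++ [x]).foldl (gstep u) ([], []) =
          gstep u ((m' ++ [e]).foldl (gstep u) ([], [])) x := by
        rw [List.foldl_append, List.foldl_cons, List.foldl_nil]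
      by_cases hxe : u x = u e
      · -- same band: x joins the running group, bands unchanged
        refine ⟨ks, x, by simp, ?_, by rw [hxe]; exact hnot, ?_⟩
        · rw [List.map_append]
          simp only [List.map_cons, List.map_nil]
          rw [ofList_append_singleton, hF]
          have hcont : PySem.Set.contains (ks ++ [u e]) (u x) = true := by
            simp [PySem.Set.contains, hxe]
          simp only [PySem.Set.add, hcont, if_pos]
          rw [hxe]
        · rw [hfold, hst]
          simp only [gstep, hcur, List.getLast?_concat]
          rw [if_neg (by
            intro hne2
            exact hne2 (by rw [hxe]))]
          rw [Prod.mk.injEq]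
          refine ⟨?_, ?_⟩
          · apply List.map_congr_left
            intro k hk
            rw [List.filter_append]
            have : (u x == k) = false := by
              have : u x ≠ k := by
                intro hh; rw [hxe] at hh; subst hh; exact hnot hk
              simp [this]
            simp [List.filter_append, List.filter_cons, this]
          · simp [List.filter_append, hxe]
      · -- new band: the running group is closed, x starts a new one
        have hxgt : u x ∉ (m' ++ [e]).map u := by
          intro hmem
          rcases List.mem_map.mp hmem with ⟨b, hb, hub⟩
          have h1 := hble b hb
          have h2 := hbx e (by simp)
          omega
        have hFx : u x ∉ ks ++ [u e] := by
          rw [← hF]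
          intro hmem
          exact hxgt ((PySem.Set.mem_ofList _ _).mp hmem)
        refine ⟨ks ++ [u e], x, by simp, ?_, hFx, ?_⟩
        · rw [List.map_append]
          simp only [List.map_cons, List.map_nil]
          rw [ofList_append_singleton, hF]
          have hcont : PySem.Set.contains (ks ++ [u e]) (u x) = false := by
            cases hc : PySem.Set.contains (ks ++ [u e]) (u x) with
            | false => rfl
            | true =>
              exact absurd (by simpa [PySem.Set.contains] using hc) hFx
          simp only [PySem.Set.add, hcont]
          simp
        · rw [hfold, hst]
          simp only [gstep, hcur, List.getLast?_concat]
          rw [if_pos (by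
            intro hh
            exact hxe hh.symm)]
          rw [Prod.mk.injEq]
          refine ⟨?_, ?_⟩
          · rw [List.map_append]
            congr 1
            · apply List.map_congr_left
              intro k hk
              rw [List.filter_append]
              have : (u x == k) = false := by
                have : u x ≠ k := by
                  intro hh; subst hh; exact hFx (List.mem_append_left _ hk)
                simp [this]
              simp [List.filter_append, List.filter_cons, this]
            · simp only [List.map_cons, List.map_nil]
              have hxe' : (u x == u e) = false := by simp [hxe]
              simp [List.filter_append, hxe']
          · rw [List.filter_append]
            have h1 : (m' ++ [e]).filter (fun b => u b == u x) = [] := by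
              rw [List.filter_eq_nil_iff]
              intro b hb
              simp only [beq_iff_eq]
              intro hub
              exact hxgt (List.mem_map.mpr ⟨b, hb, hub⟩)
            rw [h1]
            simp

theorem group_fold_char (bh : Int) (l : List (List (String × Int)))
    (h : l.Pairwise (fun a b => pvBand bh a ≤ pvBand bh b)) :
    (let st := l.foldl
        (fun (st : List (List (List (String × Int))) × List (List (String × Int))) bit =>
          match st.2.getLast? with
          | some last =>
            if pvBand bh last ≠ pvBand bh bit
            then (st.1 ++ [st.2], [bit])
            else (st.1, st.2 ++ [bit])
          | none => (st.1, st.2 ++ [bit]))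
        ([], [])
      if st.2 = [] then st.1 else st.1 ++ [st.2]) =
      (PySem.Set.ofList (l.map (pvBand bh))).map
        (fun k => l.filter (fun b => pvBand bh b == k)) := by
  have hg : (fun (st : List (List (List (String × Int))) × List (List (String × Int))) bit =>
      match st.2.getLast? with
      | some last =>
        if pvBand bh last ≠ pvBand bh bit
        then (st.1 ++ [st.2], [bit])
        else (st.1, st.2 ++ [bit])
      | none => (st.1, st.2 ++ [bit])) = gstep (pvBand bh) := by
    funext st bit
    cases hlast : st.2.getLast? with
    | none => simp [gstep, hlast]
    | some last => simp [gstep, hlast]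
  rw [hg]
  by_cases hl : l = []
  · subst hl
    simp [PySem.Set.ofList, PySem.Set.empty]
  · obtain ⟨ks, e, hlast, hF, hnot, hst⟩ := gfold_char (pvBand bh) l h hl
    rw [hst]
    dsimp only
    have he : e ∈ l := by
      obtain ⟨m', rfl⟩ := List.getLast?_eq_some_iff.mp hlast
      simp
    have hcur : l.filter (fun b => pvBand bh b == pvBand bh e) ≠ [] := by
      intro hnil
      rw [List.filter_eq_nil_iff] at hnil
      exact hnil e he (by simp)
    rw [if_neg hcur, hF]
    rw [List.map_append]
    simp

theorem B_char (bits : List (List (String × Int))) (bh : Int) :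
    group_bits_by_lines_alt bits bh =
      (PySem.Set.ofList ((PySem.List.sorted2 bits (fun b => pvBand bh b)
          (fun b => pvLookup b "x") false).map (pvBand bh))).map
        (fun k => (PySem.List.sorted2 bits (fun b => pvBand bh b)
            (fun b => pvLookup b "x") false).filter (fun b => pvBand bh b == k)) := by
  have hpw := sorted2_pairwise' (fun b => pvBand bh b) (fun b => pvLookup b "x") bits
  have hmono : (PySem.List.sorted2 bits (fun b => pvBand bh b) (fun b => pvLookup b "x")
      false).Pairwise (fun a b => pvBand bh a ≤ pvBand bh b) := by
    refine hpw.imp ?_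
    intro a b hab
    have h1 : decide (pvBand bh b < pvBand bh a) = false :=
      (Bool.or_eq_false_iff.mp hab).1
    simp only [decide_eq_false_iff_not] at h1
    omega
  exact group_fold_char bh _ hmono

theorem pairwise_le_foldl_add (l s : List Int)
    (hs : s.Pairwise (· ≤ ·)) (hsl : ∀ a ∈ s, ∀ b ∈ l, a ≤ b)
    (hl : l.Pairwise (· ≤ ·)) :
    (l.foldl PySem.Set.add s).Pairwise (· ≤ ·) := by
  induction l generalizing s with
  | nil => simpa using hs
  | cons x xs ih =>
    rcases List.pairwise_cons.mp hl with ⟨hx, hxs⟩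
    rw [List.foldl_cons]
    apply ih
    · show (PySem.Set.add s x).Pairwise (· ≤ ·)
      unfold PySem.Set.add
      split
      · exact hs
      · rw [List.pairwise_append]
        refine ⟨hs, List.pairwise_singleton _ _, ?_⟩
        intro a ha b hb
        rw [List.mem_singleton] at hb
        subst hb
        exact hsl a ha _ List.mem_cons_self
    · intro a ha b hb
      unfold PySem.Set.add at ha
      split at ha
      · exact hsl a ha b (List.mem_cons_of_mem _ hb)
      · rcases List.mem_append.mp ha with ha | ha
        · exact hsl a ha b (List.mem_cons_of_mem _ hb)
        · rw [List.mem_singleton] at ha; subst ha; exact hx b hb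
    · exact hxs

theorem pairwise_le_ofList (l : List Int) (hl : l.Pairwise (· ≤ ·)) :
    (PySem.Set.ofList l).Pairwise (· ≤ ·) :=
  pairwise_le_foldl_add l [] (List.Pairwise.nil) (by simp) hl

-- the two (nodup) key lists are the same set, B's is already increasing, so A's sort returns it
theorem keys_eq (bits : List (List (String × Int))) (bh : Int) :
    PySem.List.sorted (PySem.Set.ofList (bits.map (pvBand bh))) (fun k => k) false =
      PySem.Set.ofList ((PySem.List.sorted2 bits (fun b => pvBand bh b)
        (fun b => pvLookup b "x") false).map (pvBand bh)) := by
  apply PySem.List.sorted_eq_of_perm_of_pairwise_lt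
  · rw [List.perm_ext_iff_of_nodup (PySem.Set.nodup_ofList _) (PySem.Set.nodup_ofList _)]
    intro a
    simp only [PySem.Set.mem_ofList, List.mem_map]
    constructor
    · rintro ⟨b, hb, rfl⟩
      exact ⟨b, (PySem.List.sorted2_perm bits _ _ false).mem_iff.mp hb, rfl⟩
    · rintro ⟨b, hb, rfl⟩
      exact ⟨b, (PySem.List.sorted2_perm bits _ _ false).mem_iff.mpr hb, rfl⟩
  · have hmono : ((PySem.List.sorted2 bits (fun b => pvBand bh b) (fun b => pvLookup b "x")
        false).map (pvBand bh)).Pairwise (· ≤ ·) := by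
      rw [List.pairwise_map]
      refine (sorted2_pairwise' (fun b => pvBand bh b) (fun b => pvLookup b "x") bits).imp ?_
      intro a b hab
      have h1 : decide (pvBand bh b < pvBand bh a) = false :=
        (Bool.or_eq_false_iff.mp hab).1
      simp only [decide_eq_false_iff_not] at h1
      omega
    have hle := pairwise_le_ofList _ hmono
    have hne : (PySem.Set.ofList ((PySem.List.sorted2 bits (fun b => pvBand bh b)
        (fun b => pvLookup b "x") false).map (pvBand bh))).Pairwise (· ≠ ·) :=
      PySem.Set.nodup_ofList _
    exact (hle.and hne).imp (fun h => lt_of_le_of_ne h.1 h.2)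

theorem group_bits_by_lines_spec : Claim_equal_group_bits_by_lines := by
  intro bits bh _ _
  unfold Spec_group_bits_by_lines
  rw [A_char, B_char, keys_eq]
  apply List.map_congr_left
  intro k hk
  rw [filter_sorted2]

-- ===== VERDICT (by name: the statement is the Claim_ definition above) =====
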